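-- pv_equiv track=rewrite | github.com/se348/A2SV-programming | 1380-lucky-numbers-in-a-matrix/1380-lucky-numbers-in-a-matrix.py | maximCols
-- ===== SOURCE A (Python) =====
-- def maximCols(matrix):
--     vals = set()
--
--     for i in range(len(matrix[0])):
--         temp = 0
--
--         for j in range(1, len(matrix)):
--             if matrix[j][i] > matrix[temp][i]:
--                 temp = j
--
--         vals.add((temp, i))
--
--     return vals
-- ===== SOURCE B (Python) =====
-- def maximCols(matrix):
--     best = [(v, 0) for v in matrix[0]]
--     for j, row in enumerate(matrix[1:], 1):
--         best = [(v, j) if v > bv else (bv, br)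
--                 for (bv, br), v in zip(best, row)]
--     return {(r, i) for i, (_, r) in enumerate(best)}
-- ===== Notes on version B (the rewrite author's own statement) =====
-- stated objective: alternative
-- what changed: Replaces A's column-major nested index loops (which re-read matrix[temp][i] at every comparison) with a single row-major streaming pass: an elementwise zip-merge of a per-column (best value, best row) accumulator against each row, then one enumerate over the accumulator to emit the set.
import Mathlib
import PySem

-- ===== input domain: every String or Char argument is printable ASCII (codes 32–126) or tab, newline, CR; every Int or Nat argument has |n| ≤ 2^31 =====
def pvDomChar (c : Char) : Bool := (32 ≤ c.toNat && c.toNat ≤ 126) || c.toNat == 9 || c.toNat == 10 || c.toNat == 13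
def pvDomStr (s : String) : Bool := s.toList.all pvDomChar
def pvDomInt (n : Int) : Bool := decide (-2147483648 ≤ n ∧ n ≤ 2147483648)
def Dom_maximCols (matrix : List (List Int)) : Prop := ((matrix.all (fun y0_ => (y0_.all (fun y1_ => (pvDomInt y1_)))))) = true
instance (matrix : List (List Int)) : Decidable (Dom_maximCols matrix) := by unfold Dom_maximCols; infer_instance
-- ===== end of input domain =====

-- B replaces A's column-major nested index loops (re-reading matrix[temp][i] each step)
-- with a single row-major streaming pass: one elementwise merge of a per-column
-- (best value, best row) accumulator per row; same asymptotics (objective: alternative).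

-- ===== PORT A =====
def maximCols (matrix : List (List Int)) : List (Int × Int) :=
  let row0 := PySem.List.pyGetD matrix 0 []
  (PySem.List.pyRange 0 (row0.length : Int) 1).foldl (fun vals i =>
    let temp := (PySem.List.pyRange 1 (matrix.length : Int) 1).foldl (fun temp j =>
      if PySem.List.pyGetD (PySem.List.pyGetD matrix j []) i 0 >
         PySem.List.pyGetD (PySem.List.pyGetD matrix temp []) i 0 then j else temp) 0
    PySem.Set.add vals (temp, i)) []

-- ===== PORT B =====
-- best = [(v, 0) for v in matrix[0]]; for j,row in enumerate(matrix[1:],1): elementwise merge;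
-- return {(r, i) for i,(_,r) in enumerate(best)}
def maximCols_alt (matrix : List (List Int)) : List (Int × Int) :=
  let best0 := (PySem.List.pyGetD matrix 0 []).map (fun v => (v, (0 : Int)))
  let best := (PySem.List.enumerate (PySem.List.slice matrix (some 1) none) 1).foldl
    (fun acc p => (acc.zip p.2).map (fun q => if q.2 > q.1.1 then (q.2, p.1) else q.1)) best0
  (PySem.List.enumerate best 0).foldl (fun s p => PySem.Set.add s (p.2.2, p.1)) []

-- ===== PRECONDITION & SPEC =====
-- Pre_ excludes the inputs on which the Python A raises IndexError: the empty matrix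
-- (A reads matrix[0]) and matrices with a row shorter than row 0 (A reads matrix[j][i]).
def Pre_maximCols (matrix : List (List Int)) : Prop :=
  matrix ≠ [] ∧ ∀ row ∈ matrix, (matrix.headD []).length ≤ row.length
instance (matrix : List (List Int)) : Decidable (Pre_maximCols matrix) := by
  unfold Pre_maximCols; infer_instance
def pvWitness_maximCols : List (List Int) := [[3, 7, 8], [9, 11, 13], [15, 16, 17]]

def Spec_maximCols (matrix : List (List Int)) (out : List (Int × Int)) : Prop := out = maximCols_alt matrix
instance (matrix : List (List Int)) (out : List (Int × Int)) : Decidable (Spec_maximCols matrix out) := by unfold Spec_maximCols; infer_instance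

-- ===== CLAIM (what is proved, stated in full; the proofs are below) =====
def Claim_equal_maximCols : Prop := ∀ (matrix : List (List Int)), Dom_maximCols matrix → Pre_maximCols matrix → Spec_maximCols matrix (maximCols matrix)

-- ===== LEMMAS AND PROOFS =====

-- folding Set.add of pairwise-distinct new elements is append
theorem pv_foldl_add_map {α β : Type} [BEq β] [LawfulBEq β] (f : α → β) :
    ∀ (xs : List α) (acc : List β), (∀ x ∈ xs, f x ∉ acc) → (xs.map f).Nodup →
    xs.foldl (fun s x => PySem.Set.add s (f x)) acc = acc ++ xs.map f := by
  intro xs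
  induction xs with
  | nil => intro acc _ _; simp
  | cons x t ih =>
    intro acc hacc hnd
    simp only [List.map_cons, List.nodup_cons] at hnd
    have hx : f x ∉ acc := hacc x (by simp)
    have : PySem.Set.add acc (f x) = acc ++ [f x] := by
      simp [PySem.Set.add, PySem.Set.contains, hx]
    simp only [List.foldl_cons, this]
    rw [ih (acc ++ [f x]) ?_ hnd.2]
    · simp
    · intro y hy
      simp only [List.mem_append, List.mem_singleton]
      push Not
      refine ⟨hacc y (by simp [hy]), ?_⟩
      intro h
      exact hnd.1 (h ▸ List.mem_map_of_mem hy)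

theorem pv_foldl_add_map_nil {α β : Type} [BEq β] [LawfulBEq β] (f : α → β) (xs : List α)
    (hnd : (xs.map f).Nodup) :
    xs.foldl (fun s x => PySem.Set.add s (f x)) [] = xs.map f := by
  have := pv_foldl_add_map f xs [] (by simp) hnd
  simpa using this

theorem pv_nodup_pairs (g : Nat → Int) (n : Nat) :
    ((List.range n).map (fun k => (g k, (k : Int)))).Nodup := by
  refine List.Nodup.map ?_ List.nodup_range
  intro a b hab
  have := congrArg Prod.snd hab
  simpa using this

theorem pv_pyGet?_map {α β : Type} (f : α → β) (xs : List α) (i : Int) :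
    PySem.List.pyGet? (xs.map f) i = (PySem.List.pyGet? xs i).map f := by
  simp [PySem.List.pyGet?]

theorem pv_pyGetD_map {α β : Type} (f : α → β) (xs : List α) (i : Int) (d : α) (e : β)
    (h : f d = e) : PySem.List.pyGetD (xs.map f) i e = f (PySem.List.pyGetD xs i d) := by
  simp [PySem.List.pyGetD, pv_pyGet?_map]
  cases PySem.List.pyGet? xs i with
  | none => simp [h]
  | some v => simp

-- max over a nonempty list, as returned by Python's max
def pvMaxVal (col : List Int) : Int := (PySem.List.max? col (fun x => x)).getD 0
-- first index of the max
def pvFidx (col : List Int) : Nat := (PySem.List.index? col (pvMaxVal col)).getD 0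

theorem pv_max?_ne_nil {col : List Int} (h : col ≠ []) :
    PySem.List.max? col (fun x => x) = some (pvMaxVal col) := by
  cases col with
  | nil => exact absurd rfl h
  | cons c t => simp [pvMaxVal, PySem.List.max?_id_cons]

theorem pv_maxVal_mem {col : List Int} (h : col ≠ []) : pvMaxVal col ∈ col :=
  PySem.List.max?_mem (pv_max?_ne_nil h)

theorem pv_maxVal_isMax {col : List Int} (h : col ≠ []) : ∀ y ∈ col, y ≤ pvMaxVal col :=
  PySem.List.max?_isMax (pv_max?_ne_nil h)

theorem pv_maxVal_append {col : List Int} (a : Int) (h : col ≠ []) :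
    pvMaxVal (col ++ [a]) = max (pvMaxVal col) a := by
  cases col with
  | nil => exact absurd rfl h
  | cons c t =>
    simp [pvMaxVal, List.cons_append, PySem.List.max?_id_cons, List.foldl_append]

theorem pv_fidx_spec {col : List Int} (h : col ≠ []) :
    ∃ hk : pvFidx col < col.length, col[pvFidx col] = pvMaxVal col := by
  have hmem := pv_maxVal_mem h
  have hs : (PySem.List.index? col (pvMaxVal col)).isSome := by
    rw [PySem.List.index?_isSome_iff]; exact hmem
  obtain ⟨k, hk⟩ := Option.isSome_iff_exists.mp hs
  obtain ⟨hlt, hval, _⟩ := PySem.List.getElem_of_index?_eq_some hk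
  have hfk : pvFidx col = k := by unfold pvFidx; rw [hk]; rfl
  rw [hfk]
  exact ⟨hlt, by simpa using hval⟩

-- appending one element updates first-argmax exactly like the running comparison step
theorem pv_fidx_append {col : List Int} (a : Int) (h : col ≠ []) :
    pvFidx (col ++ [a]) = if a > pvMaxVal col then col.length else pvFidx col := by
  by_cases hgt : a > pvMaxVal col
  · have hnot : a ∉ col := fun hmem => absurd (pv_maxVal_isMax h a hmem) (by omega)
    have hmx : pvMaxVal (col ++ [a]) = a := by
      rw [pv_maxVal_append a h]; omega
    unfold pvFidx
    rw [hmx, PySem.List.index?_append_singleton_self col a hnot]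
    simp [hgt]
  · have hmx : pvMaxVal (col ++ [a]) = pvMaxVal col := by
      rw [pv_maxVal_append a h]; omega
    simp only [pvFidx, hmx, hgt, if_false]
    rw [PySem.List.index?_append_of_mem [a] (pv_maxVal_mem h)]

-- A's inner running-argmax loop over a column computes the first index of the max
theorem pv_argmax_take (col : List Int) (h : col ≠ []) :
    ∀ m : Nat, 1 ≤ m → m ≤ col.length →
    (PySem.List.pyRange 1 (m : Int) 1).foldl
      (fun t j => if PySem.List.pyGetD col j 0 > PySem.List.pyGetD col t 0 then j else t) 0
    = ((pvFidx (col.take m) : Nat) : Int) := by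
  intro m
  induction m with
  | zero => intro h1 _; omega
  | succ m ih =>
    intro _ hlen
    by_cases hm1 : 1 ≤ m
    · have hmlen : m < col.length := by omega
      have hcast : ((m + 1 : Nat) : Int) = (m : Int) + 1 := by push_cast; ring
      rw [hcast, PySem.List.pyRange_one_succ_right (by exact_mod_cast hm1),
        List.foldl_append, ih hm1 (by omega)]
      have hklen : (col.take m).length = m := by
        rw [List.length_take]; omega
      have htk_ne : col.take m ≠ [] := by
        intro hc
        rw [hc] at hklen
        simp at hklen
        omega
      obtain ⟨hklt, hkval⟩ := pv_fidx_spec htk_ne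
      have hfm : pvFidx (col.take m) < col.length := by
        rw [hklen] at hklt
        omega
      have hg1 : PySem.List.pyGetD col ((m : Nat) : Int) 0 = col[m] := by
        rw [PySem.List.pyGetD_eq_getElem _ _ (by omega) (by exact_mod_cast hmlen)]
        simp
      have hg2 : PySem.List.pyGetD col ((pvFidx (col.take m) : Nat) : Int) 0
          = pvMaxVal (col.take m) := by
        rw [PySem.List.pyGetD_eq_getElem _ _ (by omega) (by exact_mod_cast hfm)]
        rw [← hkval]
        simp [List.getElem_take]
      have htake : col.take (m + 1) = col.take m ++ [col[m]] := by
        rw [List.take_add_one]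
        simp [List.getElem?_eq_getElem hmlen]
      rw [htake, pv_fidx_append col[m] htk_ne]
      simp only [List.foldl_cons, List.foldl_nil, hg1, hg2]
      split_ifs with hgt <;> simp [hklen]
    · have hm0 : m = 0 := by omega
      subst hm0
      cases col with
      | nil => exact absurd rfl h
      | cons c t =>
        rw [show (((0 : Nat) + 1 : Nat) : Int) = 1 by norm_num,
          PySem.List.pyRange_one_eq_nil (le_refl 1)]
        simp [pvFidx, pvMaxVal, PySem.List.max?_id_cons]

theorem pv_argmax_fold (col : List Int) (h : col ≠ []) :
    (PySem.List.pyRange 1 (col.length : Int) 1).foldl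
      (fun t j => if PySem.List.pyGetD col j 0 > PySem.List.pyGetD col t 0 then j else t) 0
    = ((pvFidx col : Nat) : Int) := by
  have := pv_argmax_take col h col.length (by
    cases col with
    | nil => exact absurd rfl h
    | cons c t => simp) (le_refl _)
  simpa using this

theorem pv_pyGetD_nil {α : Type} (i : Int) (d : α) :
    PySem.List.pyGetD ([] : List α) i d = d := by
  simp [PySem.List.pyGetD, PySem.List.pyGet?]

theorem pv_col_get (matrix : List (List Int)) (c j : Int) :
    PySem.List.pyGetD (matrix.map (fun row => PySem.List.pyGetD row c 0)) j 0
    = PySem.List.pyGetD (PySem.List.pyGetD matrix j []) c 0 :=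
  pv_pyGetD_map _ _ _ [] _ (pv_pyGetD_nil _ _)

-- A's outer loop as a map over the column indices
theorem pv_fold_add_range (g : Int → Int) (n : Nat) :
    (PySem.List.pyRange 0 (n : Int) 1).foldl
      (fun vals i => PySem.Set.add vals (g i, i)) []
    = (List.range n).map (fun (k : Nat) => (g (k : Int), ((k : Nat) : Int))) := by
  rw [PySem.List.pyRange_zero_nat, List.foldl_map]
  exact pv_foldl_add_map_nil (fun k : Nat => (g (k : Int), ((k : Nat) : Int))) _
    (pv_nodup_pairs (fun k => g (k : Int)) n)

-- B-SIDE: the elementwise merge of a (range n).map g accumulator with a long-enough row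
theorem pv_merge_map (n : Nat) (g : Nat → Int × Int) (x : List Int) (j : Int)
    (hx : n ≤ x.length) :
    (((List.range n).map g).zip x).map
        (fun q => if q.2 > q.1.1 then (q.2, j) else q.1)
    = (List.range n).map (fun i =>
        if x.getD i 0 > (g i).1 then (x.getD i 0, j) else g i) := by
  apply List.ext_getElem
  · simp; omega
  · intro k h1 h2
    have hkn : k < n := by simpa using h2
    have hkx : k < x.length := by omega
    have hgd : x.getD k 0 = x[k] := List.getD_eq_getElem x 0 hkx
    simp [List.getElem_zip, List.getElem?_eq_getElem hkx]

-- a column of the matrix (Nat index, default 0 — under Pre_ every access is in range)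
def pvCol (m : List (List Int)) (i : Nat) : List Int := m.map (fun row => row.getD i 0)

-- B's row-streaming fold computes, per column, (max value, first argmax row)
theorem pv_best_char (r0 : List Int) :
    ∀ (rs : List (List Int)), (∀ row ∈ rs, r0.length ≤ row.length) →
    (PySem.List.enumerate rs 1).foldl
      (fun acc p => (acc.zip p.2).map (fun q => if q.2 > q.1.1 then (q.2, p.1) else q.1))
      (r0.map (fun v => (v, (0 : Int))))
    = (List.range r0.length).map (fun i =>
        (pvMaxVal (pvCol (r0 :: rs) i), ((pvFidx (pvCol (r0 :: rs) i) : Nat) : Int))) := by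
  intro rs
  induction rs using List.reverseRecOn with
  | nil =>
    intro _
    simp only [PySem.List.enumerate_nil, List.foldl_nil]
    apply List.ext_getElem
    · simp
    · intro k h1 h2
      have hk : k < r0.length := by simpa using h1
      have : pvCol [r0] k = [r0.getD k 0] := by simp [pvCol]
      simp [this, pvMaxVal, pvFidx, PySem.List.max?_id_cons, PySem.List.index?,
        List.getElem?_eq_getElem hk]
  | append_singleton t x ih =>
    intro hlen
    have hlt : ∀ row ∈ t, r0.length ≤ row.length := fun row hr => hlen row (by simp [hr])
    have hlx : r0.length ≤ x.length := hlen x (by simp)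
    rw [PySem.List.enumerate_append, List.foldl_append, ih hlt]
    simp only [PySem.List.enumerate_cons, PySem.List.enumerate_nil, List.foldl_cons,
      List.foldl_nil]
    rw [pv_merge_map _ _ _ _ hlx]
    apply List.map_congr_left
    intro k hk
    have hkn : k < r0.length := List.mem_range.mp hk
    have hcol : pvCol (r0 :: (t ++ [x])) k = pvCol (r0 :: t) k ++ [x.getD k 0] := by
      simp [pvCol, List.map_append]
    have hne : pvCol (r0 :: t) k ≠ [] := by simp [pvCol]
    have hclen : (pvCol (r0 :: t) k).length = t.length + 1 := by simp [pvCol]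
    rw [hcol, pv_maxVal_append _ hne, pv_fidx_append _ hne, hclen]
    by_cases hgt : x.getD k 0 > pvMaxVal (pvCol (r0 :: t) k)
    · simp only [hgt, if_pos]
      have : max (pvMaxVal (pvCol (r0 :: t) k)) (x.getD k 0) = x.getD k 0 := by omega
      rw [this]
      congr 1
      push_cast
      ring
    · simp only [hgt, if_false]
      have : max (pvMaxVal (pvCol (r0 :: t) k)) (x.getD k 0)
          = pvMaxVal (pvCol (r0 :: t) k) := by omega
      rw [this]

-- enumerate of a (range n).map as a map over range
theorem pv_enumerate_map_range {α : Type} (n : Nat) (g : Nat → α) :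
    PySem.List.enumerate ((List.range n).map g) 0
    = (List.range n).map (fun k => (((k : Nat) : Int), g k)) := by
  apply List.ext_getElem
  · simp [PySem.List.length_enumerate]
  · intro k h1 h2
    have hkn : k < n := by simpa using h2
    rw [PySem.List.getElem_enumerate]
    simp

-- ===== VERDICT (by name: the statement is the Claim_ definition above) =====
theorem maximCols_spec : Claim_equal_maximCols := by
  intro matrix _ hpre
  obtain ⟨hne, hrows⟩ := hpre
  unfold Spec_maximCols
  obtain ⟨r0, rs, rfl⟩ : ∃ r0 rs, matrix = r0 :: rs := by
    cases matrix with
    | nil => exact absurd rfl hne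
    | cons a b => exact ⟨a, b, rfl⟩
  have hhead : PySem.List.pyGetD (r0 :: rs) 0 [] = r0 := by
    simp [PySem.List.pyGetD_zero]
  have hrs : ∀ row ∈ rs, r0.length ≤ row.length := by
    intro row hr
    have := hrows row (by simp [hr])
    simpa using this
  -- B side
  have hslice : PySem.List.slice (r0 :: rs) (some 1) none = rs := by
    rw [PySem.List.slice_from_one]; rfl
  have hB : maximCols_alt (r0 :: rs)
      = (List.range r0.length).map (fun k =>
          (((pvFidx (pvCol (r0 :: rs) k) : Nat) : Int), ((k : Nat) : Int))) := by
    simp only [maximCols_alt, hhead, hslice]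
    rw [pv_best_char r0 rs hrs, pv_enumerate_map_range]
    rw [List.foldl_map]
    exact pv_foldl_add_map_nil
      (fun k => (((pvFidx (pvCol (r0 :: rs) k) : Nat) : Int), ((k : Nat) : Int))) _
      (pv_nodup_pairs (fun k => ((pvFidx (pvCol (r0 :: rs) k) : Nat) : Int)) _)
  -- A side
  rw [hB]
  simp only [maximCols, hhead]
  trans ((List.range r0.length).map (fun k =>
    ((PySem.List.pyRange 1 ((r0 :: rs).length : Int) 1).foldl (fun temp j =>
        if PySem.List.pyGetD (PySem.List.pyGetD (r0 :: rs) j []) ((k : Nat) : Int) 0 >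
           PySem.List.pyGetD (PySem.List.pyGetD (r0 :: rs) temp []) ((k : Nat) : Int) 0
        then j else temp) 0, ((k : Nat) : Int))))
  · exact pv_fold_add_range (fun i =>
      (PySem.List.pyRange 1 ((r0 :: rs).length : Int) 1).foldl (fun temp j =>
        if PySem.List.pyGetD (PySem.List.pyGetD (r0 :: rs) j []) i 0 >
           PySem.List.pyGetD (PySem.List.pyGetD (r0 :: rs) temp []) i 0
        then j else temp) 0) _
  · apply List.map_congr_left
    intro k _
    have hcol : pvCol (r0 :: rs) k
        = (r0 :: rs).map (fun row => PySem.List.pyGetD row ((k : Nat) : Int) 0) := by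
      simp [pvCol, PySem.List.pyGetD_natCast]
    have hbody : (fun (temp j : Int) =>
          if PySem.List.pyGetD (PySem.List.pyGetD (r0 :: rs) j []) ((k : Nat) : Int) 0 >
             PySem.List.pyGetD (PySem.List.pyGetD (r0 :: rs) temp []) ((k : Nat) : Int) 0
          then j else temp)
        = (fun (temp j : Int) =>
          if PySem.List.pyGetD ((r0 :: rs).map (fun row => PySem.List.pyGetD row ((k : Nat) : Int) 0)) j 0 >
             PySem.List.pyGetD ((r0 :: rs).map (fun row => PySem.List.pyGetD row ((k : Nat) : Int) 0)) temp 0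
          then j else temp) := by
      funext temp j
      rw [pv_col_get, pv_col_get]
    have hcne : (r0 :: rs).map (fun row => PySem.List.pyGetD row ((k : Nat) : Int) 0) ≠ [] := by
      simp
    have hclen : (((r0 :: rs).map (fun row => PySem.List.pyGetD row ((k : Nat) : Int) 0)).length : Int)
        = ((r0 :: rs).length : Int) := by simp
    have harg := pv_argmax_fold _ hcne
    rw [hclen] at harg
    rw [hbody, harg, ← hcol]
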